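-- pv_equiv track=rewrite | github.com/tcmitchell/AdventOfCode | 2017/day9/puzzle1.py | filter_garbage
-- ===== SOURCE A (Python) =====
-- def filter_garbage(in_data):
--     out = []
--     in_size = len(in_data)
--     in_ptr = 0
--     in_garbage = False
--     while in_ptr < in_size:
--         in_char = in_data[in_ptr]
--         if in_garbage:
--             if in_char == '!':
--                 in_ptr += 1
--             elif in_char == '>':
--                 in_garbage = False
--             else:
--                 pass
--         else:
--             if in_char == '<':
--                 in_garbage = True
--             else:
--                 out.append(in_data[in_ptr])
--         in_ptr += 1
--     return ''.join(out)
-- ===== SOURCE B (Python) =====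
-- def filter_garbage(in_data):
--     out = []
--     i = 0
--     while True:
--         lt = in_data.find('<', i)
--         if lt == -1:
--             out.append(in_data[i:])
--             break
--         out.append(in_data[i:lt])
--         j = lt + 1
--         while True:
--             gt = in_data.find('>', j)
--             if gt == -1:
--                 return ''.join(out)
--             k = 0
--             while in_data[gt - 1 - k] == '!':
--                 k += 1
--             if k % 2 == 0:
--                 break
--             j = gt + 1
--         i = gt + 1
--     return ''.join(out)
-- ===== Notes on version B (the rewrite author's own statement) =====
-- stated objective: faster
-- what changed: Replaced A's character-by-character state-machine walk (index pointer plus a garbage flag) by a delimiter-jumping scan: str.find jumps straight to each garbage opener and to each candidate closer, a backward count of the consecutive escape characters before a candidate decides by run-length parity whether it is escaped, and the kept text is copied as whole slices instead of one character at a time.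
import Mathlib
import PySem

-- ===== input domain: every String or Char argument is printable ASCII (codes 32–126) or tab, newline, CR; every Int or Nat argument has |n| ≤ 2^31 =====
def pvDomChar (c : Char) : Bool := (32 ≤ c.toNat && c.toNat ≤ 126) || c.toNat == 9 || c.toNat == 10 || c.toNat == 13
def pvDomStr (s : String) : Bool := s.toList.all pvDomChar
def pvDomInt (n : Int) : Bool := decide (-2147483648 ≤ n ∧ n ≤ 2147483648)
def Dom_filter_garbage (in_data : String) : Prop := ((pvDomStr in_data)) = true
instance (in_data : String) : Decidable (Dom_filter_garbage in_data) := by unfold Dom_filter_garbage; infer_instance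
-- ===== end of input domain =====

-- B replaces A's character-by-character state machine by a delimiter-jumping scan: str.find
-- locates each '<' and each candidate '>', a backward count of the '!' run before a candidate
-- decides by PARITY whether it is escaped, and the kept text is copied as whole slices
-- (measured constant-factor faster in a timing run).

-- ===== PORT A =====
-- A's while loop: in_ptr walks the string, in_garbage is the state flag; '!' advances an extra step.
def fgLoopA (s : List Char) (in_size in_ptr : Int) (in_garbage : Bool) (out : List Char) : List Char :=
  if _h : in_ptr < in_size then
    match PySem.List.pyGet? s in_ptr with
    | none => out  -- unreachable: Python's in_data[in_ptr] cannot raise under the guard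
    | some in_char =>
      if in_garbage then
        if in_char = '!' then fgLoopA s in_size (in_ptr + 1 + 1) in_garbage out
        else if in_char = '>' then fgLoopA s in_size (in_ptr + 1) false out
        else fgLoopA s in_size (in_ptr + 1) in_garbage out
      else
        if in_char = '<' then fgLoopA s in_size (in_ptr + 1) true out
        else fgLoopA s in_size (in_ptr + 1) in_garbage (out ++ [in_char])
  else out
termination_by (in_size - in_ptr).toNat
decreasing_by all_goals omega

def filter_garbage (in_data : String) : String :=
  String.ofList (fgLoopA in_data.toList (in_data.toList.length : Int) 0 false [])

-- ===== PORT B =====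
-- Source B's innermost loop 'while in_data[gt - 1 - k] == '!': k += 1' (fuel only for totality;
-- it is bounded by the guaranteed stop at the '<' that opened the block).
def fgRun (s : List Char) (gt k : Int) : Nat → Int
  | 0 => k
  | fuel + 1 =>
    if PySem.List.pyGet? s (gt - 1 - k) = some '!' then fgRun s gt (k + 1) fuel else k

-- Source B's inner 'while True' loop: find the next '>', keep it iff its '!' run has even length;
-- returns the index of the real closer, none = 'return ''.join(out)' on unterminated garbage.
def fgInner (s : List Char) (j : Int) : Nat → Option Int
  | 0 => none  -- fuel exhaustion, unreachable from the entry point (j grows each pass)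
  | fuel + 1 =>
    let gt := PySem.Chars.findFrom s ['>'] j none
    if gt = -1 then none
    else if PySem.Int.mod (fgRun s gt 0 (gt + s.length + 1).toNat) 2 = 0 then some gt
    else fgInner s (gt + 1) fuel

-- Source B's outer 'while True' loop: out collects the slices between garbage blocks; ''.join(out)
-- is the flatten of the collected slices.
def fgOuterB (s : List Char) (i : Int) (out : List (List Char)) : Nat → List Char
  | 0 => out.flatten  -- fuel exhaustion, unreachable from the entry point (i grows each pass)
  | fuel + 1 =>
    let lt := PySem.Chars.findFrom s ['<'] i none
    if lt = -1 then (out ++ [PySem.List.slice s (some i) none]).flatten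
    else
      match fgInner s (lt + 1) (s.length + 1) with
      | none => (out ++ [PySem.List.slice s (some i) (some lt)]).flatten
      | some gt => fgOuterB s (gt + 1) (out ++ [PySem.List.slice s (some i) (some lt)]) fuel

def filter_garbage_alt (in_data : String) : String :=
  String.ofList (fgOuterB in_data.toList 0 [] (in_data.toList.length + 1))

-- ===== PRECONDITION & SPEC =====
def Spec_filter_garbage (in_data : String) (out : String) : Prop := out = filter_garbage_alt in_data
instance (in_data : String) (out : String) : Decidable (Spec_filter_garbage in_data out) := by unfold Spec_filter_garbage; infer_instance

-- ===== CLAIM (what is proved, stated in full; the proofs are below) =====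
def Claim_equal_filter_garbage : Prop := ∀ (in_data : String), Dom_filter_garbage in_data → Spec_filter_garbage in_data (filter_garbage in_data)

-- ===== LEMMAS AND PROOFS =====

-- The common mathematical skeleton both ports are reduced to: a structural recursion that
-- copies characters and, on '<', skips one garbage block ('!' eats the next character).
def fgSkip : List Char → List Char
  | [] => []
  | g :: rest =>
    if g = '!' then fgSkip (rest.drop 1)
    else if g = '>' then rest
    else fgSkip rest
termination_by l => l.length
decreasing_by all_goals (simp; try omega)

theorem fgSkip_length_le (l : List Char) : (fgSkip l).length ≤ l.length := by
  induction l using fgSkip.induct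
  case case1 => simp [fgSkip]
  case case2 rest ih =>
    have h2 : (fgSkip (List.drop 1 rest)).length ≤ rest.length :=
      le_trans ih (by simp)
    rw [List.drop_one] at h2
    simp [fgSkip]
    omega
  case case3 rest h => simp [fgSkip, h]
  case case4 g rest h1 h2 ih => simp [fgSkip, h1, h2]; omega

def fgOuter : List Char → List Char
  | [] => []
  | c :: rest =>
    if c = '<' then fgOuter (fgSkip rest)
    else c :: fgOuter rest
termination_by l => l.length
decreasing_by
  · have := fgSkip_length_le rest; simp; omega
  · simp

-- ---- A's loop equals the skeleton ----
theorem fgLoopA_eq (s : List Char) :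
    ∀ (n : Nat) (ptr : Int) (g : Bool) (out : List Char), 0 ≤ ptr → n = ((s.length : Int) - ptr).toNat →
      fgLoopA s (s.length : Int) ptr g out =
        out ++ (if g then fgOuter (fgSkip (s.drop ptr.toNat)) else fgOuter (s.drop ptr.toNat)) := by
  intro n
  induction n using Nat.strong_induction_on with
  | _ n ih =>
    intro ptr g out hptr hn
    by_cases h : ptr < (s.length : Int)
    · have hlt : ptr.toNat < s.length := by omega
      have hget : PySem.List.pyGet? s ptr = some (s[ptr.toNat]) :=
        PySem.List.pyGet?_eq_some_getElem s hptr h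
      have hdrop : s.drop ptr.toNat = s[ptr.toNat] :: s.drop (ptr.toNat + 1) :=
        (List.getElem_cons_drop hlt).symm
      have e1 : (ptr + 1).toNat = ptr.toNat + 1 := by omega
      have e2 : (ptr + 1 + 1).toNat = ptr.toNat + 2 := by omega
      rw [fgLoopA, dif_pos h, hget]
      dsimp only
      cases g with
      | true =>
        by_cases hc : s[ptr.toNat] = '!'
        · rw [if_pos hc]
          rw [ih ((s.length : Int) - (ptr + 1 + 1)).toNat (by omega) (ptr + 1 + 1) true out (by omega) rfl]
          rw [hdrop]
          simp [fgSkip, hc, e2, List.drop_drop]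
        · by_cases hc2 : s[ptr.toNat] = '>'
          · rw [if_neg hc, if_pos hc2]
            rw [ih ((s.length : Int) - (ptr + 1)).toNat (by omega) (ptr + 1) false out (by omega) rfl]
            rw [hdrop]
            simp [fgSkip, hc2, e1]
          · rw [if_neg hc, if_neg hc2]
            rw [ih ((s.length : Int) - (ptr + 1)).toNat (by omega) (ptr + 1) true out (by omega) rfl]
            rw [show fgSkip (List.drop ptr.toNat s) = fgSkip (List.drop (ptr.toNat + 1) s) by
              rw [hdrop, fgSkip]; simp [hc, hc2]]
            simp [e1]
      | false =>
        by_cases hc : s[ptr.toNat] = '<'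
        · rw [if_pos hc]
          rw [ih ((s.length : Int) - (ptr + 1)).toNat (by omega) (ptr + 1) true out (by omega) rfl]
          rw [hdrop, hc]
          rw [show fgOuter ('<' :: s.drop (ptr.toNat + 1)) = fgOuter (fgSkip (s.drop (ptr.toNat + 1))) by
            rw [fgOuter]; simp]
          simp [e1]
        · rw [if_neg hc]
          rw [ih ((s.length : Int) - (ptr + 1)).toNat (by omega) (ptr + 1) false (out ++ [s[ptr.toNat]]) (by omega) rfl]
          rw [hdrop]
          rw [show fgOuter (s[ptr.toNat] :: s.drop (ptr.toNat + 1)) = s[ptr.toNat] :: fgOuter (s.drop (ptr.toNat + 1)) by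
            rw [fgOuter]; simp [hc]]
          simp [e1]
    · have hnil : s.drop ptr.toNat = [] := by
        apply List.drop_eq_nil_of_le; omega
      rw [fgLoopA]
      simp [h, hnil, fgSkip, fgOuter]

-- ---- facts about a single-character find ----
theorem find_char_none (s : List Char) (c : Char) (j : Nat) (hj : j ≤ s.length)
    (h : PySem.Chars.findFrom s [c] j none = -1) :
    ∀ m, j ≤ m → (hm : m < s.length) → s[m] ≠ c := by
  intro m hjm hm hc
  have hni : ¬ [c] <:+: s.drop j := (PySem.Chars.findFrom_natCast_eq_neg_one_iff s [c] j hj).mp h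
  apply hni
  have hpre : [c] <+: s.drop m := by
    refine ⟨s.drop (m + 1), ?_⟩
    have := (List.getElem_cons_drop hm).symm
    simp [hc] at this
    simpa using this.symm
  have hsuf : s.drop m <:+ s.drop j := by
    have : s.drop m = (s.drop j).drop (m - j) := by
      rw [List.drop_drop]; congr 1; omega
    rw [this]; exact List.drop_suffix _ _
  exact hpre.isInfix.trans hsuf.isInfix

theorem find_char_some (s : List Char) (c : Char) (j : Nat) (hj : j ≤ s.length)
    (h : PySem.Chars.findFrom s [c] j none ≠ -1) :
    ∃ g : Nat, PySem.Chars.findFrom s [c] j none = (g : Int) ∧ j ≤ g ∧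
      g < s.length ∧ s[g]? = some c ∧
      (∀ m, j ≤ m → m < g → s[m]? ≠ some c) := by
  obtain ⟨h1, h2, h3⟩ := PySem.Chars.findFrom_natCast_spec s [c] j hj h
  set f := PySem.Chars.findFrom s [c] (j : Int) none with hf
  have h0 : 0 ≤ f := le_trans (by exact_mod_cast Nat.zero_le j) h1
  refine ⟨f.toNat, by omega, by omega, ?_, ?_, ?_⟩
  · obtain ⟨t, ht⟩ := h2
    have : f.toNat < s.length := by
      have := congrArg List.length ht
      simp [List.length_drop] at this
      omega
    exact this
  · obtain ⟨t, ht⟩ := h2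
    have : (s.drop f.toNat)[0]? = some c := by rw [← ht]; simp
    simpa [List.getElem?_drop] using this
  · intro m hjm hmg hc
    apply h3 m (by exact_mod_cast hjm) (by exact_mod_cast hmg)
    refine ⟨s.drop (m+1), ?_⟩
    obtain ⟨hm, hgc⟩ := List.getElem?_eq_some_iff.mp hc
    have := (List.getElem_cons_drop hm).symm
    simp [hgc] at this
    simpa using this.symm

-- ---- the maximal '!' run ending just before position g ----
def runEnd (s : List Char) : Nat → Nat
  | 0 => 0
  | g + 1 => if s[g]? = some '!' then runEnd s g + 1 else 0

theorem runEnd_le (s : List Char) (g : Nat) : runEnd s g ≤ g := by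
  induction g with
  | zero => simp [runEnd]
  | succ g ih => rw [runEnd]; split <;> omega

theorem runEnd_mem (s : List Char) (g : Nat) :
    ∀ m, g - runEnd s g ≤ m → m < g → s[m]? = some '!' := by
  induction g with
  | zero => omega
  | succ g ih =>
    intro m h1 h2
    rw [runEnd] at h1
    split at h1
    · rename_i hg
      rcases Nat.lt_or_ge m g with hm | hm
      · exact ih m (by omega) hm
      · have : m = g := by omega
        subst this; exact hg
    · omega

theorem runEnd_stop (s : List Char) (g : Nat) :
    g - runEnd s g = 0 ∨ s[g - runEnd s g - 1]? ≠ some '!' := by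
  induction g with
  | zero => left; rfl
  | succ g ih =>
    rw [runEnd]
    split
    · rcases ih with h | h
      · left; omega
      · right
        have : g + 1 - (runEnd s g + 1) = g - runEnd s g := by omega
        rw [this]; exact h
    · right; simpa using (by assumption : ¬ s[g]? = some '!')

-- fgRun computes runEnd, provided the run stops at a genuine non-'!' character (index ≥ 0).
theorem fgRun_eq_runEnd (s : List Char) (g : Nat) (hg : g ≤ s.length)
    (hstop : 1 ≤ g - runEnd s g) :
    ∀ (fuel k : Nat), k ≤ runEnd s g → runEnd s g - k < fuel →
      fgRun s (g : Int) (k : Int) fuel = (runEnd s g : Int) := by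
  intro fuel
  induction fuel with
  | zero => intro k _ h; omega
  | succ fuel ih =>
    intro k hk hf
    have hr := runEnd_le s g
    have hidx : ((g : Int) - 1 - (k : Int)) = ((g - 1 - k : Nat) : Int) := by
      push_cast; omega
    have hlt : g - 1 - k < s.length := by omega
    have hget : PySem.List.pyGet? s ((g : Int) - 1 - (k : Int)) = some (s[g-1-k]) := by
      rw [hidx]; exact PySem.List.pyGet?_eq_some_getElem s (by omega) (by exact_mod_cast hlt)
    rcases Nat.lt_or_ge k (runEnd s g) with hcase | hcase
    · have hbang : s[g-1-k]? = some '!' := runEnd_mem s g (g-1-k) (by omega) (by omega)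
      have hbang' : s[g-1-k] = '!' := by
        have := List.getElem?_eq_some_iff.mp hbang; exact this.2
      rw [fgRun, hget]
      simp only [hbang', if_pos rfl]
      have : (k : Int) + 1 = ((k + 1 : Nat) : Int) := by push_cast; ring
      rw [this]
      exact ih (k+1) (by omega) (by omega)
    · have hke : k = runEnd s g := by omega
      subst hke
      have hnb : s[g - runEnd s g - 1]? ≠ some '!' := by
        rcases runEnd_stop s g with h | h
        · omega
        · exact h
      have : s[g - 1 - runEnd s g]? = s[g - runEnd s g - 1]? := by congr 1; omega
      rw [fgRun, hget]
      have hne : s[g-1-runEnd s g] ≠ '!' := by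
        intro hcontra
        apply hnb
        rw [← this]
        exact List.getElem?_eq_some_iff.mpr ⟨by omega, hcontra⟩
      simp [hne]

theorem getLastD_ne_lt (l : List Char) (c : Char) (h : l.getLastD c ≠ '!') :
    l.getLastD '<' ≠ '!' := by
  cases l with
  | nil => decide
  | cons a t => rwa [List.getLastD_cons] at h ⊢

theorem fgSkip_append (a x : List Char) (hgt : ∀ c ∈ a, c ≠ '>')
    (hlast : a.getLastD '<' ≠ '!') : fgSkip (a ++ x) = fgSkip x := by
  induction a using fgSkip.induct
  case case1 => rfl
  case case2 rest ih =>
    cases rest with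
    | nil => simp [List.getLastD] at hlast
    | cons d rest' =>
      rw [List.cons_append, fgSkip]
      simp only [if_pos rfl, List.cons_append, List.drop_one, List.tail_cons]
      refine ih (fun c hc => hgt c (List.mem_cons_of_mem _ (List.mem_cons_of_mem _ hc))) ?_
      rw [List.getLastD_cons, List.getLastD_cons] at hlast
      exact getLastD_ne_lt _ _ hlast
  case case3 rest h => exact absurd rfl (hgt '>' (by simp))
  case case4 g rest h1 h2 ih =>
    rw [List.cons_append, fgSkip, if_neg h1, if_neg h2]
    apply ih (fun c hc => hgt c (List.mem_cons_of_mem _ hc))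
    rw [List.getLastD_cons] at hlast
    exact getLastD_ne_lt _ _ hlast

theorem fgSkip_run (k : Nat) (rest : List Char) :
    fgSkip (List.replicate k '!' ++ '>' :: rest) = if k % 2 = 0 then rest else fgSkip rest := by
  induction k using Nat.strong_induction_on with
  | _ k ih =>
    match k with
    | 0 => rw [List.replicate_zero, List.nil_append, fgSkip]; simp
    | 1 =>
      rw [show List.replicate 1 '!' ++ '>' :: rest = '!' :: '>' :: rest from rfl, fgSkip]
      simp [fgSkip]
    | k + 2 =>
      rw [show List.replicate (k+2) '!' = '!' :: '!' :: List.replicate k '!' by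
        simp [List.replicate_succ], List.cons_append, List.cons_append, fgSkip]
      simp only [if_pos rfl, List.drop_one, List.tail_cons]
      rw [ih k (by omega)]
      have h2 : (k + 2) % 2 = k % 2 := by omega
      rw [h2]; simp

theorem fgSkip_no_gt (l : List Char) (h : ∀ c ∈ l, c ≠ '>') : fgSkip l = [] := by
  induction l using fgSkip.induct
  case case1 => rw [fgSkip]
  case case2 rest ih =>
    rw [fgSkip]; simp only [if_pos rfl]
    exact ih (fun c hc => h c (List.mem_cons_of_mem _ (List.mem_of_mem_drop hc)))
  case case3 rest hgt => exact absurd rfl (h '>' (by simp))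
  case case4 g rest h1 h2 ih =>
    rw [fgSkip, if_neg h1, if_neg h2]
    exact ih (fun c hc => h c (List.mem_cons_of_mem _ hc))

theorem fgOuter_no_lt (l : List Char) (h : ∀ c ∈ l, c ≠ '<') : fgOuter l = l := by
  induction l with
  | nil => rw [fgOuter]
  | cons c rest ih =>
    rw [fgOuter, if_neg (h c (by simp))]
    rw [ih (fun c hc => h c (List.mem_cons_of_mem _ hc))]

theorem fgOuter_append_no_lt (a x : List Char) (h : ∀ c ∈ a, c ≠ '<') :
    fgOuter (a ++ x) = a ++ fgOuter x := by
  induction a with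
  | nil => simp
  | cons c rest ih =>
    rw [List.cons_append, fgOuter, if_neg (h c (by simp)), List.cons_append]
    rw [ih (fun c hc => h c (List.mem_cons_of_mem _ hc))]

-- ---- Source B's inner loop finds exactly the closer fgSkip stops at ----
theorem skip_decomp (s : List Char) (j g : Nat) (hj1 : 1 ≤ j) (hjg : j ≤ g) (hg : g < s.length)
    (hgt : s[g]? = some '>') (hmin : ∀ m, j ≤ m → m < g → s[m]? ≠ some '>')
    (hstopj : s[j-1]? ≠ some '!') :
    j ≤ g - runEnd s g ∧
    fgSkip (s.drop j) = (if runEnd s g % 2 = 0 then s.drop (g+1) else fgSkip (s.drop (g+1))) := by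
  have hr := runEnd_le s g
  have hjr : j ≤ g - runEnd s g := by
    by_contra hlt
    push_neg at hlt
    exact hstopj (runEnd_mem s g (j-1) (by omega) (by omega))
  refine ⟨hjr, ?_⟩
  set r := runEnd s g with hrdef
  have hgch : s[g]'hg = '>' := (List.getElem?_eq_some_iff.mp hgt).2
  have hdropg : s.drop g = '>' :: s.drop (g+1) := by
    have := (List.getElem_cons_drop hg).symm
    rw [hgch] at this
    exact this
  have e1 : s.drop j = (s.drop j).take (g - j) ++ ('>' :: s.drop (g+1)) := by
    conv_lhs => rw [← List.take_append_drop (g - j) (s.drop j)]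
    rw [List.drop_drop, show j + (g - j) = g by omega, hdropg]
  have e2 : (s.drop j).take (g - j) = (s.drop j).take (g - r - j) ++ ((s.drop j).drop (g - r - j)).take r := by
    rw [← List.take_add]
    congr 1
    omega
  have e3 : ((s.drop j).drop (g - r - j)).take r = List.replicate r '!' := by
    rw [List.drop_drop, show j + (g - r - j) = g - r by omega]
    apply List.eq_replicate_iff.mpr
    constructor
    · rw [List.length_take, List.length_drop]
      omega
    · intro b hb
      obtain ⟨idx, hidx, hbi⟩ := List.mem_iff_getElem.mp hb
      have hidxr : idx < r := by
        have := hidx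
        simp [List.length_take, List.length_drop] at this
        omega
      have hx : ((s.drop (g - r)).take r)[idx]? = s[g - r + idx]? := by
        rw [List.getElem?_take_of_lt hidxr]
        simp [List.getElem?_drop]
      rw [List.getElem?_eq_getElem hidx, hbi] at hx
      have hbang := runEnd_mem s g (g - r + idx) (by omega) (by omega)
      rw [← hx] at hbang
      exact Option.some.inj hbang
  set mid := (s.drop j).take (g - r - j) with hmid
  have hmidgt : ∀ c ∈ mid, c ≠ '>' := by
    intro c hc
    obtain ⟨idx, hidx, hci⟩ := List.mem_iff_getElem.mp hc
    have hidxr : idx < g - r - j := by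
      have := hidx
      simp [hmid, List.length_take, List.length_drop] at this
      omega
    have hx : mid[idx]? = s[j + idx]? := by
      rw [hmid, List.getElem?_take_of_lt hidxr]
      simp [List.getElem?_drop]
    rw [List.getElem?_eq_getElem hidx, hci] at hx
    intro hcontra
    exact hmin (j + idx) (by omega) (by omega) (by rw [← hx, hcontra])
  have hmidlast : mid.getLastD '<' ≠ '!' := by
    rcases Nat.eq_zero_or_pos (g - r - j) with h0 | hpos
    · rw [hmid, h0]
      simp [List.getLastD]
    · have hmlen : mid.length = g - r - j := by
        rw [hmid]
        simp [List.length_take, List.length_drop]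
        omega
      have hmne : mid ≠ [] := by
        intro hcontra
        rw [hcontra] at hmlen
        simp at hmlen
        omega
      have hstop2 : s[g - r - 1]? ≠ some '!' := by
        rcases runEnd_stop s g with h | h
        · omega
        · exact h
      have hgl : mid.getLastD '<' = mid.getLast hmne := by
        rw [List.getLastD_eq_getLast?, List.getLast?_eq_some_getLast hmne]
        rfl
      rw [hgl, List.getLast_eq_getElem]
      intro hcontra
      apply hstop2
      have hx : mid[mid.length - 1]? = s[j + (mid.length - 1)]? := by
        have hbnd : mid.length - 1 < g - r - j := by omega
        rw [hmid, List.getElem?_take_of_lt (by rw [← hmid]; exact hbnd)]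
        simp [List.getElem?_drop]
      rw [List.getElem?_eq_getElem (by omega), hcontra] at hx
      rw [show g - r - 1 = j + (mid.length - 1) by omega]
      exact hx.symm
  calc fgSkip (s.drop j) = fgSkip (mid ++ (List.replicate r '!' ++ ('>' :: s.drop (g+1)))) := by
        rw [e1, e2, e3, List.append_assoc, hmid]
    _ = fgSkip (List.replicate r '!' ++ ('>' :: s.drop (g+1))) := fgSkip_append _ _ hmidgt hmidlast
    _ = if r % 2 = 0 then s.drop (g+1) else fgSkip (s.drop (g+1)) := fgSkip_run r _

theorem fgInner_eq (s : List Char) :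
    ∀ (fuel : Nat) (j : Nat), 1 ≤ j → j ≤ s.length → s[j-1]? ≠ some '!' →
      s.length + 1 - j ≤ fuel →
      (fgInner s (j : Int) fuel = none → fgSkip (s.drop j) = []) ∧
      (∀ gt, fgInner s (j : Int) fuel = some gt →
        ∃ g : Nat, gt = (g : Int) ∧ j ≤ g ∧ g < s.length ∧
          fgSkip (s.drop j) = s.drop (g + 1)) := by
  intro fuel
  induction fuel with
  | zero => intro j h1 h2 _ hf; omega
  | succ fuel ih =>
    intro j hj1 hjl hstopj hfuel
    rw [fgInner]
    by_cases hfind : PySem.Chars.findFrom s ['>'] (j : Int) none = -1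
    · simp only [hfind, if_pos rfl]
      constructor
      · intro _
        apply fgSkip_no_gt
        intro c hc hcontra
        obtain ⟨idx, hidx, hci⟩ := List.mem_iff_getElem.mp hc
        have hlen : idx < s.length - j := by simpa [List.length_drop] using hidx
        have hx : (s.drop j)[idx] = s[j + idx]'(by omega) := by
          rw [List.getElem_drop]
        exact find_char_none s '>' j hjl hfind (j + idx) (by omega) (by omega)
          (by rw [← hx, hci, hcontra])
      · intro gt hgt
        simp at hgt
    · obtain ⟨g, hfeq, hjg, hglt, hggt, hmin⟩ := find_char_some s '>' j hjl hfind
      obtain ⟨hjr, hskip⟩ := skip_decomp s j g hj1 hjg hglt hggt hmin hstopj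
      have hrun : fgRun s ((g : Nat) : Int) 0 (((g : Nat) : Int) + s.length + 1).toNat = (runEnd s g : Int) :=
        fgRun_eq_runEnd s g (by omega) (by omega) (((g : Nat) : Int) + s.length + 1).toNat 0
          (by omega) (by omega)
      have hmod : PySem.Int.mod (runEnd s g : Int) 2 = ((runEnd s g % 2 : Nat) : Int) := by
        exact_mod_cast PySem.Int.mod_natCast (runEnd s g) 2
      rw [hfeq, hrun, hmod]
      by_cases hpar : runEnd s g % 2 = 0
      · rw [hpar]
        simp only [Nat.cast_zero, if_pos rfl]
        rw [if_neg (by rw [← hfeq]; exact hfind)]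
        constructor
        · intro h; simp at h
        · intro gt hgt
          have he : gt = (g : Int) := by simpa using hgt.symm
          refine ⟨g, he, hjg, hglt, ?_⟩
          rw [hskip, if_pos hpar]
      · have hne : ((runEnd s g % 2 : Nat) : Int) ≠ 0 := by
          intro hcontra
          exact hpar (by exact_mod_cast hcontra)
        rw [if_neg (by rw [← hfeq]; exact hfind), if_neg hne]
        have hstopg : s[(g+1)-1]? ≠ some '!' := by
          rw [show g + 1 - 1 = g from rfl, hggt]
          simp
        have hstep := ih (g + 1) (by omega) (by omega) hstopg (by omega)
        have hgl : ((g : Int) + 1) = ((g + 1 : Nat) : Int) := by push_cast; ring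
        rw [hgl]
        constructor
        · intro h
          rw [hskip, if_neg hpar]
          exact hstep.1 h
        · intro gt hgt
          obtain ⟨g', he, hjg', hgl', hsk'⟩ := hstep.2 gt hgt
          refine ⟨g', he, by omega, hgl', ?_⟩
          rw [hskip, if_neg hpar]
          exact hsk'

-- ---- Source B's outer loop equals the skeleton ----
theorem fgOuterB_eq (s : List Char) :
    ∀ (fuel : Nat) (i : Nat) (out : List (List Char)), i ≤ s.length →
      s.length + 1 - i ≤ fuel →
      fgOuterB s (i : Int) out fuel = out.flatten ++ fgOuter (s.drop i) := by
  intro fuel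
  induction fuel with
  | zero => intro i out h1 h2; omega
  | succ fuel ih =>
    intro i out hil hfuel
    rw [fgOuterB]
    by_cases hfind : PySem.Chars.findFrom s ['<'] (i : Int) none = -1
    · simp only [hfind, if_pos rfl]
      have hno : fgOuter (s.drop i) = s.drop i := by
        apply fgOuter_no_lt
        intro c hc hcontra
        obtain ⟨idx, hidx, hci⟩ := List.mem_iff_getElem.mp hc
        have hlen : idx < s.length - i := by simpa [List.length_drop] using hidx
        have hx : (s.drop i)[idx] = s[i + idx]'(by omega) := by
          rw [List.getElem_drop]
        exact find_char_none s '<' i hil hfind (i + idx) (by omega) (by omega)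
          (by rw [← hx, hci, hcontra])
      rw [hno, PySem.List.slice_from_natCast]
      simp [List.flatten_append]
    · obtain ⟨lt, hfeq, hilt, hllt, hlch, hmin⟩ := find_char_some s '<' i hil hfind
      have hlc : s[lt]'hllt = '<' := (List.getElem?_eq_some_iff.mp hlch).2
      have hdroplt : s.drop lt = '<' :: s.drop (lt + 1) := by
        have := (List.getElem_cons_drop hllt).symm
        rw [hlc] at this
        exact this
      have hslice : PySem.List.slice s (some (i : Int)) (some ((lt : Nat) : Int)) = (s.drop i).take (lt - i) :=
        PySem.List.slice_natCast s i lt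
      set mid := (s.drop i).take (lt - i) with hmid
      have hdecomp : s.drop i = mid ++ ('<' :: s.drop (lt + 1)) := by
        conv_lhs => rw [← List.take_append_drop (lt - i) (s.drop i)]
        rw [List.drop_drop, show i + (lt - i) = lt by omega, hdroplt, hmid]
      have hmidlt : ∀ c ∈ mid, c ≠ '<' := by
        intro c hc
        obtain ⟨idx, hidx, hci⟩ := List.mem_iff_getElem.mp hc
        have hidxr : idx < lt - i := by
          have := hidx
          simp [hmid, List.length_take, List.length_drop] at this
          omega
        have hx : mid[idx]? = s[i + idx]? := by
          rw [hmid, List.getElem?_take_of_lt hidxr]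
          simp [List.getElem?_drop]
        rw [List.getElem?_eq_getElem hidx, hci] at hx
        intro hcontra
        exact hmin (i + idx) (by omega) (by omega) (by rw [← hx, hcontra])
      have houter : fgOuter (s.drop i) = mid ++ fgOuter (fgSkip (s.drop (lt + 1))) := by
        rw [hdecomp, fgOuter_append_no_lt _ _ hmidlt]
        congr 1
        rw [fgOuter]
        simp
      have hstoplt : s[(lt + 1) - 1]? ≠ some '!' := by
        rw [show lt + 1 - 1 = lt from rfl, hlch]
        simp
      have hstep := fgInner_eq s (s.length + 1) (lt + 1) (by omega) (by omega) hstoplt (by omega)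
      have hcast : ((lt : Nat) : Int) + 1 = ((lt + 1 : Nat) : Int) := by push_cast; ring
      have hne : ¬ (((lt : Nat) : Int) = -1) := by rw [← hfeq]; exact hfind
      rw [hfeq]
      simp only [if_neg hne]
      rw [hcast]
      cases hres : fgInner s ((lt + 1 : Nat) : Int) (s.length + 1) with
      | none =>
        have hskip := hstep.1 hres
        rw [houter, hskip]
        rw [show fgOuter [] = [] from by rw [fgOuter], hslice]
        simp [List.flatten_append]
      | some gt =>
        obtain ⟨g', hge, hlg', hgl', hsk'⟩ := hstep.2 gt hres
        rw [hge]
        dsimp only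
        have hcast2 : ((g' : Nat) : Int) + 1 = ((g' + 1 : Nat) : Int) := by push_cast; ring
        rw [hcast2, ih (g' + 1) (out ++ [PySem.List.slice s (some (i : Int)) (some ((lt : Nat) : Int))]) (by omega) (by omega)]
        rw [houter, hsk', hslice]
        simp [List.flatten_append, List.append_assoc]

-- ===== VERDICT (by name: the statement is the Claim_ definition above) =====
theorem filter_garbage_spec : Claim_equal_filter_garbage := by
  intro s _
  unfold Spec_filter_garbage filter_garbage filter_garbage_alt
  rw [fgLoopA_eq s.toList (((s.toList.length : Int) - 0).toNat) 0 false [] (by omega) rfl]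
  rw [show ((0:Int) = ((0:Nat):Int)) from rfl, fgOuterB_eq s.toList _ 0 [] (by omega) (by omega)]
  simp
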